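-- pv_equiv track=rewrite | github.com/GigiJi/spotiPy | spotipy.py | getArtist
-- ===== SOURCE A (Python) =====
-- def getArtist(str1):
--     artistStr = ''
--     artNameLst = []
--     for char in str1:  # getting the info for the first artist
--         if char != '{':
--             if char != ',':
--                 artistStr += char
--             else:
--                 artNameLst.append(artistStr)
--                 artistStr = ''
--         else:
--             break
--     return artNameLst
-- ===== SOURCE B (Python) =====
-- def getArtist(str1):
--     return str1.split('{')[0].split(',')[:-1]
-- ===== Notes on version B (the rewrite author's own statement) =====
-- stated objective: simpler
-- what changed: Replaces the character-by-character scan with buffer/flush/break state by one line: split on the brace, take the prefix, split on commas and drop the final (never-flushed) segment.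
import Mathlib
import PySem

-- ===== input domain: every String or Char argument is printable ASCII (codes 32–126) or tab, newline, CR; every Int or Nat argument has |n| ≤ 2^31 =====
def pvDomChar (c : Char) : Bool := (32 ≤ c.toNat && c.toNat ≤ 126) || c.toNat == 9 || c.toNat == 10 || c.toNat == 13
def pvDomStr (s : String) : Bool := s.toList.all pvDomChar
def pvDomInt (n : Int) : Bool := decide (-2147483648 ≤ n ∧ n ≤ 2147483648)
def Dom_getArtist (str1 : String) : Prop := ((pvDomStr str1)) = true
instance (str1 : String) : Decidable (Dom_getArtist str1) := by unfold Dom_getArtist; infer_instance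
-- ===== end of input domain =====

-- B replaces A's character-by-character scan (buffer, flush on ',', break on '{')
-- by split('{')[0].split(',')[:-1]; objective: simpler.

-- ===== PORT A =====
-- the for-loop of A: state = (artistStr, artNameLst); 'break' returns the accumulator
def getArtistLoop : List Char → String → List String → List String
  | [], _, acc => acc
  | c :: rest, buf, acc =>
    if c ≠ '{' then
      if c ≠ ',' then getArtistLoop rest (buf.push c) acc
      else getArtistLoop rest "" (acc ++ [buf])
    else acc

def getArtist (str1 : String) : List String :=
  getArtistLoop str1.toList "" []

-- ===== PORT B =====
-- str1.split('{')[0].split(',')[:-1]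
def getArtist_alt (str1 : String) : List String :=
  let pre := (PySem.List.pyGet? ((PySem.Str.split? str1 "{").getD []) 0).getD ""
  PySem.List.slice ((PySem.Str.split? pre ",").getD []) none (some (-1))

-- ===== PRECONDITION & SPEC =====
def Spec_getArtist (str1 : String) (out : List String) : Prop := out = getArtist_alt str1
instance (str1 : String) (out : List String) : Decidable (Spec_getArtist str1 out) := by unfold Spec_getArtist; infer_instance

-- ===== CLAIM (what is proved, stated in full; the proofs are below) =====
def Claim_equal_getArtist : Prop := ∀ (str1 : String), Dom_getArtist str1 → Spec_getArtist str1 (getArtist str1)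

-- ===== LEMMAS AND PROOFS =====

-- structural single-character splitter used only in the proofs
def mySplit (c : Char) : List Char → List (List Char)
  | [] => [[]]
  | x :: rest => if x = c then [] :: mySplit c rest else (mySplit c rest).modifyHead (x :: ·)

theorem mySplit_ne_nil (c : Char) (l : List Char) : mySplit c l ≠ [] := by
  induction l with
  | nil => simp [mySplit]
  | cons x rest ih =>
    simp only [mySplit]
    split
    · simp
    · cases h : mySplit c rest with
      | nil => exact absurd h ih
      | cons a t => simp [List.modifyHead]

theorem modifyHead_id (M : List (List Char)) :
    M.modifyHead (fun x => x) = M := by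
  cases M <;> simp [List.modifyHead]

theorem splitOn_go_char (c : Char) :
    ∀ (fuel : Nat) (l cur : List Char) (acc : List (List Char)), l.length < fuel →
      PySem.Chars.splitOn.go [c] fuel l cur acc
        = acc.reverse ++ (mySplit c l).modifyHead (cur.reverse ++ ·) := by
  intro fuel
  induction fuel with
  | zero => intro l cur acc h; omega
  | succ n ih =>
    intro l cur acc h
    cases l with
    | nil =>
      simp [PySem.Chars.splitOn.go, mySplit, List.modifyHead]
    | cons x rest =>
      rw [PySem.Chars.splitOn.go]
      by_cases hx : x = c
      · subst hx
        have hpre : List.isPrefixOf [x] (x :: rest) = true := by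
          simp [List.isPrefixOf]
        simp only [hpre, if_pos]
        rw [show List.drop [x].length (x :: rest) = rest by simp]
        rw [ih rest [] (cur.reverse :: acc) (by simpa using Nat.lt_of_succ_lt_succ h)]
        have hms : mySplit x (x :: rest) = [] :: mySplit x rest := by simp [mySplit]
        rw [hms]
        simp only [List.modifyHead, List.reverse_nil, List.reverse_cons, List.nil_append,
          List.append_assoc, List.singleton_append, List.append_nil]
        cases mySplit x rest <;> rfl
      · have hpre : List.isPrefixOf [c] (x :: rest) = false := by
          simp [List.isPrefixOf]
          exact fun hcx => absurd hcx.symm hx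
        simp only [hpre, Bool.false_eq_true, if_false]
        rw [ih rest (x :: cur) acc (by simpa using Nat.lt_of_succ_lt_succ h)]
        have : (mySplit c (x :: rest)) = (mySplit c rest).modifyHead (x :: ·) := by
          simp [mySplit, hx]
        rw [this]
        cases hM : mySplit c rest with
        | nil => exact absurd hM (mySplit_ne_nil c rest)
        | cons a t => simp [List.modifyHead]

theorem splitOn_char (c : Char) (l : List Char) :
    PySem.Chars.splitOn l [c] = mySplit c l := by
  unfold PySem.Chars.splitOn
  rw [splitOn_go_char c (l.length + 1) l [] [] (by omega)]
  simp [modifyHead_id]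

theorem str_split_char (s : String) (c : Char) :
    PySem.Str.split? s (String.ofList [c])
      = some ((mySplit c s.toList).map String.ofList) := by
  have h := PySem.Str.split?_map s (String.ofList [c])
  rw [PySem.Chars.split?.eq_1] at h
  simp only [String.toList_ofList, List.isEmpty_cons, splitOn_char] at h
  cases hs : PySem.Str.split? s (String.ofList [c]) with
  | none => rw [hs] at h; simp at h
  | some parts =>
    rw [hs] at h
    simp only [Option.map_some, if_false, Option.some.injEq, Bool.false_eq_true] at h
    congr 1
    rw [← h]
    simp [List.map_map, Function.comp_def]

theorem mySplit_head (c : Char) (l : List Char) :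
    (mySplit c l).headD [] = l.takeWhile (· ≠ c) := by
  induction l with
  | nil => simp [mySplit]
  | cons x rest ih =>
    by_cases hx : x = c
    · subst hx; simp [mySplit, List.takeWhile]
    · simp only [mySplit, if_neg hx]
      rw [List.takeWhile_cons_of_pos (by simp [hx])]
      cases hM : mySplit c rest with
      | nil => exact absurd hM (mySplit_ne_nil c rest)
      | cons a t =>
        rw [hM] at ih
        simp only [List.headD_cons, ne_eq, decide_not] at ih
        simp [List.modifyHead, ih]

-- A's loop computes the comma-pieces of the prefix before '{', last piece dropped
theorem getArtistLoop_eq (l : List Char) :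
    ∀ (buf : String) (acc : List String),
      getArtistLoop l buf acc
        = acc ++ (((mySplit ',' (l.takeWhile (· ≠ '{'))).modifyHead
            (buf.toList ++ ·)).map String.ofList).dropLast := by
  induction l with
  | nil => intro buf acc; simp [getArtistLoop, mySplit, List.modifyHead]
  | cons x rest ih =>
    intro buf acc
    by_cases hbr : x = '{'
    · subst hbr
      simp [getArtistLoop, List.takeWhile, mySplit, List.modifyHead]
    · rw [List.takeWhile_cons_of_pos (by simp [hbr])]
      by_cases hc : x = ','
      · subst hc
        rw [show getArtistLoop (',' :: rest) buf acc
              = getArtistLoop rest "" (acc ++ [buf]) by simp [getArtistLoop, hbr]]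
        rw [ih "" (acc ++ [buf])]
        have hms : mySplit ',' (',' :: rest.takeWhile (· ≠ '{'))
            = [] :: mySplit ',' (rest.takeWhile (· ≠ '{')) := by
          simp [mySplit]
        rw [hms]
        cases hMh : mySplit ',' (rest.takeWhile (· ≠ '{')) with
        | nil => exact absurd hMh (mySplit_ne_nil ',' _)
        | cons a t =>
          simp [List.modifyHead, List.dropLast_cons₂]
      · rw [show getArtistLoop (x :: rest) buf acc
              = getArtistLoop rest (buf.push x) acc by simp [getArtistLoop, hbr, hc]]
        rw [ih (buf.push x) acc]
        have : mySplit ',' (x :: rest.takeWhile (· ≠ '{'))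
            = (mySplit ',' (rest.takeWhile (· ≠ '{'))).modifyHead (x :: ·) := by
          simp [mySplit, hc]
        rw [this]
        cases hMh : mySplit ',' (rest.takeWhile (· ≠ '{')) with
        | nil => exact absurd hMh (mySplit_ne_nil ',' _)
        | cons a t => simp [List.modifyHead, String.toList_push]

theorem getArtist_alt_eq (str1 : String) :
    getArtist_alt str1
      = ((mySplit ',' (str1.toList.takeWhile (· ≠ '{'))).map String.ofList).dropLast := by
  unfold getArtist_alt
  have h1 : PySem.Str.split? str1 "{" = some ((mySplit '{' str1.toList).map String.ofList) := by
    have := str_split_char str1 '{'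
    simpa using this
  rw [h1]
  have hhead : (PySem.List.pyGet? ((mySplit '{' str1.toList).map String.ofList) 0).getD ""
      = String.ofList (str1.toList.takeWhile (· ≠ '{')) := by
    rw [← mySplit_head '{' str1.toList]
    cases hM : mySplit '{' str1.toList with
    | nil => exact absurd hM (mySplit_ne_nil '{' str1.toList)
    | cons a t => simp [PySem.List.pyGet?, PySem.List.pyIdx?]
  simp only [Option.getD_some, hhead]
  have h2 : PySem.Str.split? (String.ofList (str1.toList.takeWhile (· ≠ '{'))) ","
      = some ((mySplit ',' ((String.ofList (str1.toList.takeWhile (· ≠ '{'))).toList)).map String.ofList) := by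
    have := str_split_char (String.ofList (str1.toList.takeWhile (· ≠ '{'))) ','
    simpa using this
  rw [h2]
  simp [PySem.List.slice_to_neg_one]

-- ===== VERDICT (by name: the statement is the Claim_ definition above) =====
theorem getArtist_spec : Claim_equal_getArtist := by
  intro str1 _
  unfold Spec_getArtist getArtist
  rw [getArtistLoop_eq, getArtist_alt_eq]
  simp [modifyHead_id]
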